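-- pv_equiv track=rewrite | github.com/eSentire/iocs | DarkCloud/DarkCloud-IDA.py | numeric_password
-- ===== SOURCE A (Python) =====
-- def numeric_password(password: str) -> int:
--     value = 0
--     shift1 = 0
--     shift2 = 0
--     for i in range(len(password)):
--         ch = ord(password[i])
--         value ^= (ch * (2 ** shift1))
--         value ^= (ch * (2 ** shift2))
--         shift1 = (shift1 + 7) % 19
--         shift2 = (shift2 + 13) % 23
--
--     return value
-- ===== SOURCE B (Python) =====
-- def numeric_password(password: str) -> int:
--     # The shift amounts depend only on the position modulo 19 (resp. 23), and
--     # left-shift distributes over XOR, so first aggregate the characters into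
--     # residue buckets, then shift each bucket's combined XOR exactly once.
--     b19 = [0] * 19
--     b23 = [0] * 23
--     for i, c in enumerate(password):
--         b19[i % 19] ^= ord(c)
--         b23[i % 23] ^= ord(c)
--     value = 0
--     for r in range(19):
--         value ^= b19[r] << (7 * r % 19)
--     for r in range(23):
--         value ^= b23[r] << (13 * r % 23)
--     return value
-- ===== Notes on version B (the rewrite author's own statement) =====
-- stated objective: alternative
-- what changed: Instead of threading two shift accumulators through one XOR loop, B exploits that the shift amounts depend only on the position mod 19 (resp. mod 23) and that left-shift distributes over XOR: it aggregates the characters into 19+23 residue buckets in one pass and then shifts and XORs each bucket exactly once in two small combining loops.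
import Mathlib
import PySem

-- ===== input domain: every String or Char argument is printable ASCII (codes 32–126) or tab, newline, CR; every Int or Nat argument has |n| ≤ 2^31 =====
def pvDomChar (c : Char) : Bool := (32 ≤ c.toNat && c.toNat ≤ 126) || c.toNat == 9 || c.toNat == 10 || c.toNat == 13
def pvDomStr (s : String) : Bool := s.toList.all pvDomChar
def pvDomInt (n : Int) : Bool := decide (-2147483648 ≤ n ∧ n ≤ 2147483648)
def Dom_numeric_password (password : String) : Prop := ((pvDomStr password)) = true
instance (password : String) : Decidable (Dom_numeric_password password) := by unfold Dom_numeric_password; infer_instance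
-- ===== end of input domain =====

-- B replaces A's single stateful XOR loop by a bucket aggregation: the two shift amounts
-- depend only on the position mod 19 (resp. mod 23) and shifting distributes over XOR, so
-- B first XORs the characters into 19+23 residue buckets and then shifts each bucket once
-- (objective: alternative decomposition, same O(n) cost).

-- ===== PORT A =====
-- A loops over range(len(password)) reading password[i] in order; ported as structural
-- recursion over the character list carrying the same state (value, shift1, shift2).
-- value ^= x is ported with PySem.Int.bxor; ch * 2 ** shift as ch * 2 ^ shift (exact).
def npLoopA : List Char → Int → Nat → Nat → Int
  | [], value, _, _ => value
  | c :: cs, value, shift1, shift2 =>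
    let ch : Int := (c.toNat : Int)
    let value : Int := PySem.Int.bxor value (ch * 2 ^ shift1)
    let value : Int := PySem.Int.bxor value (ch * 2 ^ shift2)
    npLoopA cs value ((shift1 + 7) % 19) ((shift2 + 13) % 23)

def numeric_password (password : String) : Int := npLoopA password.toList 0 0 0

-- ===== PORT B =====
-- Source B's first loop ('for i, c in enumerate(password): b19[i % 19] ^= ord(c); …') as
-- structural recursion over the enumerated list updating the two bucket lists in place;
-- % on the nonnegative index is PySem.Int.mod, ^= is PySem.Int.bxor.
def npBuild : List (Int × Char) → List Int → List Int → List Int × List Int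
  | [], b19, b23 => (b19, b23)
  | ic :: rest, b19, b23 =>
    let ch : Int := (ic.2.toNat : Int)
    npBuild rest
      (b19.modify (PySem.Int.mod ic.1 19).toNat (fun x => PySem.Int.bxor x ch))
      (b23.modify (PySem.Int.mod ic.1 23).toNat (fun x => PySem.Int.bxor x ch))

-- the two combining loops 'for r in range(19/23): value ^= b[r] << shift' as folds over
-- List.range; Python's 'x << k' (k ≥ 0) is ported as x * 2 ^ k (exact for Python ints).
def numeric_password_alt (password : String) : Int :=
  let b := npBuild (PySem.List.enumerate password.toList 0)
             (List.replicate 19 0) (List.replicate 23 0)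
  let value := (List.range 19).foldl
    (fun v r => PySem.Int.bxor v ((b.1.getD r 0) * 2 ^ ((7 * r) % 19))) 0
  (List.range 23).foldl
    (fun v r => PySem.Int.bxor v ((b.2.getD r 0) * 2 ^ ((13 * r) % 23))) value

-- ===== PRECONDITION & SPEC =====
def Spec_numeric_password (password : String) (out : Int) : Prop := out = numeric_password_alt password
instance (password : String) (out : Int) : Decidable (Spec_numeric_password password out) := by unfold Spec_numeric_password; infer_instance

-- ===== CLAIM (what is proved, stated in full; the proofs are below) =====
def Claim_equal_numeric_password : Prop := ∀ (password : String), Dom_numeric_password password → Spec_numeric_password password (numeric_password password)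

-- ===== LEMMAS AND PROOFS =====

-- Nat-level models used only by the proofs.
def natBuild : List Char → Nat → List Nat → List Nat → List Nat × List Nat
  | [], _, b19, b23 => (b19, b23)
  | c :: cs, i, b19, b23 =>
    natBuild cs (i + 1) (b19.modify (i % 19) (· ^^^ c.toNat)) (b23.modify (i % 23) (· ^^^ c.toNat))

def wsum (w : Nat → Nat) : List Nat → Nat → Nat
  | [], _ => 0
  | x :: xs, k => (x <<< w k) ^^^ wsum w xs (k + 1)

def natTotal : List Char → Nat → Nat
  | [], _ => 0
  | c :: cs, i => (c.toNat <<< (7 * i % 19)) ^^^ ((c.toNat <<< (13 * i % 23)) ^^^ natTotal cs (i + 1))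

theorem xor_shiftLeft_distrib (a b k : Nat) : (a ^^^ b) <<< k = a <<< k ^^^ b <<< k := by
  apply Nat.eq_of_testBit_eq
  intro i
  simp only [Nat.testBit_shiftLeft, Nat.testBit_xor]
  by_cases h : k ≤ i <;> simp [h]

theorem wsum_modify (w : Nat → Nat) (ch : Nat) (L : List Nat) :
    ∀ (j k : Nat), j < L.length →
    wsum w (L.modify j (· ^^^ ch)) k = wsum w L k ^^^ (ch <<< w (k + j)) := by
  induction L with
  | nil => intro j k h; simp at h
  | cons x xs ih =>
    intro j k h
    cases j with
    | zero =>
      simp [wsum, xor_shiftLeft_distrib, Nat.xor_assoc, Nat.xor_comm]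
    | succ j =>
      have hj : j < xs.length := by simpa using h
      simp only [List.modify_succ_cons, wsum, ih j (k + 1) hj]
      have : k + 1 + j = k + (j + 1) := by omega
      rw [this, Nat.xor_assoc]

theorem wsum_append (w : Nat → Nat) (xs : List Nat) :
    ∀ (x k : Nat), wsum w (xs ++ [x]) k = wsum w xs k ^^^ (x <<< w (k + xs.length)) := by
  induction xs with
  | nil => intro x k; simp [wsum]
  | cons y ys ih =>
    intro x k
    have hidx : k + 1 + ys.length = k + (ys.length + 1) := by omega
    simp only [List.cons_append, wsum, ih x (k + 1), hidx, List.length_cons, Nat.xor_assoc]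

theorem wsum_replicate_zero (w : Nat → Nat) (n : Nat) : ∀ k, wsum w (List.replicate n 0) k = 0 := by
  induction n with
  | zero => intro k; simp [wsum]
  | succ n ih => intro k; simp [List.replicate_succ, wsum, ih]

theorem natBuild_len (cs : List Char) : ∀ i b19 b23,
    (natBuild cs i b19 b23).1.length = b19.length ∧ (natBuild cs i b19 b23).2.length = b23.length := by
  induction cs with
  | nil => intro i b19 b23; simp [natBuild]
  | cons c cs ih =>
    intro i b19 b23
    simpa [natBuild] using ih (i + 1) (b19.modify (i % 19) (· ^^^ c.toNat)) (b23.modify (i % 23) (· ^^^ c.toNat))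

theorem build_inv (cs : List Char) : ∀ (i : Nat) (b19 b23 : List Nat),
    b19.length = 19 → b23.length = 23 →
    wsum (fun r => 7 * r % 19) (natBuild cs i b19 b23).1 0 ^^^
      wsum (fun r => 13 * r % 23) (natBuild cs i b19 b23).2 0
    = (wsum (fun r => 7 * r % 19) b19 0 ^^^ wsum (fun r => 13 * r % 23) b23 0) ^^^ natTotal cs i := by
  induction cs with
  | nil => intro i b19 b23 _ _; simp [natBuild, natTotal]
  | cons c cs ih =>
    intro i b19 b23 h19 h23
    have e1 : 7 * (i % 19) % 19 = 7 * i % 19 := by omega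
    have e2 : 13 * (i % 23) % 23 = 13 * i % 23 := by omega
    have l19 : (b19.modify (i % 19) (· ^^^ c.toNat)).length = 19 := by simp [h19]
    have l23 : (b23.modify (i % 23) (· ^^^ c.toNat)).length = 23 := by simp [h23]
    simp only [natBuild, natTotal]
    rw [ih (i + 1) _ _ l19 l23,
        wsum_modify _ _ _ _ 0 (by omega),
        wsum_modify _ _ _ _ 0 (by omega)]
    simp only [Nat.zero_add, e1, e2]
    -- pure xor shuffling
    simp [Nat.xor_assoc, Nat.xor_comm, Nat.xor_left_comm]

-- A-side characterisation.
theorem npLoopA_eq (cs : List Char) : ∀ (i : Nat) (v : Nat),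
    npLoopA cs (v : Int) (7 * i % 19) (13 * i % 23) = ((v ^^^ natTotal cs i : Nat) : Int) := by
  induction cs with
  | nil => intro i v; simp [npLoopA, natTotal]
  | cons c cs ih =>
    intro i v
    have hch : ∀ s : Nat, ((c.toNat : Int)) * 2 ^ s = ((c.toNat <<< s : Nat) : Int) := by
      intro s; rw [Nat.shiftLeft_eq]; push_cast; ring
    have e1 : (7 * i % 19 + 7) % 19 = 7 * (i + 1) % 19 := by omega
    have e2 : (13 * i % 23 + 13) % 23 = 13 * (i + 1) % 23 := by omega
    simp only [npLoopA, hch, PySem.Int.bxor_natCast, e1, e2, ih (i + 1), natTotal]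
    congr 1
    simp [Nat.xor_assoc]

-- B-side bridge: the Int bucket-building recursion is the cast of the Nat model.
theorem map_cast_modify (L : List Nat) : ∀ (j ch : Nat),
    (L.map (fun n : Nat => (n : Int))).modify j (fun x => PySem.Int.bxor x (ch : Int))
      = (L.modify j (· ^^^ ch)).map (fun n : Nat => (n : Int)) := by
  induction L with
  | nil => intro j ch; simp
  | cons x xs ih =>
    intro j ch
    cases j with
    | zero => simp [PySem.Int.bxor_natCast]
    | succ j => simp [List.modify_succ_cons, ih j ch]

theorem npBuild_cast (cs : List Char) : ∀ (i : Nat) (b19 b23 : List Nat),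
    npBuild (PySem.List.enumerate cs (i : Int))
        (b19.map (fun n : Nat => (n : Int))) (b23.map (fun n : Nat => (n : Int)))
      = ((natBuild cs i b19 b23).1.map (fun n : Nat => (n : Int)),
         (natBuild cs i b19 b23).2.map (fun n : Nat => (n : Int))) := by
  induction cs with
  | nil => intro i b19 b23; simp [npBuild, natBuild, PySem.List.enumerate_nil]
  | cons c cs ih =>
    intro i b19 b23
    have h19 : (PySem.Int.mod (i : Int) 19).toNat = i % 19 := by
      have h : PySem.Int.mod (i : Int) 19 = ((i % 19 : Nat) : Int) := by
        exact_mod_cast PySem.Int.mod_natCast i 19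
      rw [h]; omega
    have h23 : (PySem.Int.mod (i : Int) 23).toNat = i % 23 := by
      have h : PySem.Int.mod (i : Int) 23 = ((i % 23 : Nat) : Int) := by
        exact_mod_cast PySem.Int.mod_natCast i 23
      rw [h]; omega
    have hstep : ((i : Int) + 1) = ((i + 1 : Nat) : Int) := by push_cast; ring
    simp only [PySem.List.enumerate_cons, npBuild, natBuild, h19, h23,
      map_cast_modify, hstep]
    exact ih (i + 1) _ _

-- the combining fold over List.range equals wsum.
theorem fold_range_wsum (w : Nat → Nat) (L : List Nat) :
    ∀ (n : Nat), n ≤ L.length → ∀ (v : Nat),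
    (List.range n).foldl
        (fun v r => PySem.Int.bxor v (((L.map (fun n : Nat => (n : Int))).getD r 0) * 2 ^ w r))
        (v : Int)
      = ((v ^^^ wsum w (L.take n) 0 : Nat) : Int) := by
  intro n
  induction n with
  | zero => intro _ v; simp [wsum]
  | succ n ih =>
    intro hn v
    have hn' : n < L.length := by omega
    have hget : (L.map (fun n : Nat => (n : Int))).getD n 0 = ((L[n]'hn' : Nat) : Int) := by
      simp [List.getD, List.getElem?_map, List.getElem?_eq_getElem hn']
    have htake : L.take (n + 1) = L.take n ++ [L[n]'hn'] := by
      rw [List.take_add_one, List.getElem?_eq_getElem hn']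
      simp
    rw [List.range_succ, List.foldl_append, ih (by omega) v]
    simp only [List.foldl_cons, List.foldl_nil, hget, htake, wsum_append]
    have hlen : (L.take n).length = n := List.length_take_of_le (by omega)
    rw [hlen]
    have hmul : ((L[n]'hn' : Nat) : Int) * 2 ^ w n = (((L[n]'hn') <<< w n : Nat) : Int) := by
      rw [Nat.shiftLeft_eq]; push_cast; ring
    rw [hmul, PySem.Int.bxor_natCast]
    congr 1
    simp [Nat.xor_assoc]

-- ===== VERDICT (by name: the statement is the Claim_ definition above) =====
theorem numeric_password_spec : Claim_equal_numeric_password := by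
  intro password _
  unfold Spec_numeric_password numeric_password numeric_password_alt
  set cs := password.toList with hcs
  have hA : npLoopA cs 0 0 0 = ((natTotal cs 0 : Nat) : Int) := by
    simpa using npLoopA_eq cs 0 0
  have hrep : ∀ m : Nat, List.replicate m (0 : Int) = (List.replicate m (0 : Nat)).map (fun n : Nat => (n : Int)) := by
    intro m; simp
  have hbuild := npBuild_cast cs 0 (List.replicate 19 0) (List.replicate 23 0)
  simp only [Nat.cast_zero] at hbuild
  have hlen := natBuild_len cs 0 (List.replicate 19 0) (List.replicate 23 0)
  set B := natBuild cs 0 (List.replicate 19 0) (List.replicate 23 0) with hB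
  have hinv := build_inv cs 0 (List.replicate 19 0) (List.replicate 23 0) (by simp) (by simp)
  rw [← hB] at hinv
  rw [wsum_replicate_zero, wsum_replicate_zero] at hinv
  simp only [Nat.zero_xor] at hinv
  have h1 : (List.take 19 B.1) = B.1 := List.take_of_length_le (by simp [hlen.1])
  have h2 : (List.take 23 B.2) = B.2 := List.take_of_length_le (by simp [hlen.2])
  have hfold1 := fold_range_wsum (fun r => 7 * r % 19) B.1 19 (by simp [hlen.1]) 0
  simp only [Nat.cast_zero, Nat.zero_xor, h1] at hfold1
  have hfold2 := fold_range_wsum (fun r => 13 * r % 23) B.2 23 (by simp [hlen.2])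
      (wsum (fun r => 7 * r % 19) B.1 0)
  rw [h2] at hfold2
  rw [hA]
  simp only [hrep]
  rw [hbuild]
  simp only [hfold1, hfold2, hinv]
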